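-- pv_equiv track=rewrite | github.com/rdoix/CredentialLake | backend/notifier.py | _build_priority_groups_for_file_mode
-- ===== SOURCE A (Python) =====
-- from typing import List, Dict, Optional, Tuple, Any
--
-- def _build_priority_groups_for_file_mode(parsed_credentials: List[Dict[str, str]]) -> Tuple[List[Dict[str,str]], List[Dict[str,str]], List[Dict[str,str]], List[Dict[str,str]]]:
--     """
--     Group parsed credentials into priority buckets for file mode alerts:
--     - priority_1: admin + .id domain
--     - priority_2: admin only
--     - priority_3: .id domain only
--     - priority_4: others
--     """
--     admin_keywords = ['admin', 'administrator', 'root', 'superuser', 'sysadmin', 'webadmin', 'dbadmin']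
--     p1: List[Dict[str,str]] = []
--     p2: List[Dict[str,str]] = []
--     p3: List[Dict[str,str]] = []
--     p4: List[Dict[str,str]] = []
--
--     for cred in parsed_credentials:
--         line = f"{cred.get('url','')}:{cred.get('username','')}:{cred.get('password','')}".lower()
--         has_admin = any(keyword in line for keyword in admin_keywords)
--         has_id_domain = '.id' in line
--
--         if has_admin and has_id_domain:
--             p1.append(cred)
--         elif has_admin:
--             p2.append(cred)
--         elif has_id_domain:
--             p3.append(cred)
--         else:
--             p4.append(cred)
--
--     return p1, p2, p3, p4
-- ===== SOURCE B (Python) =====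
-- from typing import List, Dict, Tuple
--
-- def _build_priority_groups_for_file_mode(parsed_credentials: List[Dict[str, str]]) -> Tuple[List[Dict[str,str]], List[Dict[str,str]], List[Dict[str,str]], List[Dict[str,str]]]:
--     """Four independent filtering passes, one per priority bucket."""
--     ADMIN_KEYWORDS = ('admin', 'administrator', 'root', 'superuser', 'sysadmin', 'webadmin', 'dbadmin')
--
--     def line(cred):
--         return f"{cred.get('url','')}:{cred.get('username','')}:{cred.get('password','')}".lower()
--
--     def has_admin(cred):
--         l = line(cred)
--         return any(k in l for k in ADMIN_KEYWORDS)
--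
--     def has_idd(cred):
--         return '.id' in line(cred)
--
--     p1 = [c for c in parsed_credentials if has_admin(c) and has_idd(c)]
--     p2 = [c for c in parsed_credentials if has_admin(c) and not has_idd(c)]
--     p3 = [c for c in parsed_credentials if not has_admin(c) and has_idd(c)]
--     p4 = [c for c in parsed_credentials if not has_admin(c) and not has_idd(c)]
--     return p1, p2, p3, p4
-- ===== Notes on version B (the rewrite author's own statement) =====
-- stated objective: simpler
-- what changed: Replaces the single four-accumulator dispatch loop with four independent filter passes over the list, one per bucket, with the per-credential tests factored into has_admin/has_idd helpers.
import Mathlib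
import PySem

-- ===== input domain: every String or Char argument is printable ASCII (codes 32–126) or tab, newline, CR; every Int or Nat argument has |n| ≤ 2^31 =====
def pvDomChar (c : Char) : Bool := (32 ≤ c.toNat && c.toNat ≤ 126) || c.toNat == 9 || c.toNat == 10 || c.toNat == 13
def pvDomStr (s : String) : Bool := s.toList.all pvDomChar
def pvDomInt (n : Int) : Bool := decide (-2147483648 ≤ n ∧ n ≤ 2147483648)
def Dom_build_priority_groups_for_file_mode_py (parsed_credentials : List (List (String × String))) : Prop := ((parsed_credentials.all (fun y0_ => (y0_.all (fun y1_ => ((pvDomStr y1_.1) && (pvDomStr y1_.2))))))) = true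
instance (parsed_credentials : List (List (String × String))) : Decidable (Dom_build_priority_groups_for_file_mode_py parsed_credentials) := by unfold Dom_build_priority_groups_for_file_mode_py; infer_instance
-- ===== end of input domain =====

-- B: four independent filter passes (one per bucket) with factored predicates, instead of A's single four-accumulator dispatch loop; same result, simpler decomposition.


-- ===== PORT A =====
-- A-side helper: the loop body of A (one credential dispatched to its bucket)
def pvStepA (acc : (List (List (String × String))) × (List (List (String × String))) × (List (List (String × String))) × (List (List (String × String)))) (cred : List (String × String)) : (List (List (String × String))) × (List (List (String × String))) × (List (List (String × String))) × (List (List (String × String))) :=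
  let d := PySem.Dict.mk cred
  let line := PySem.Str.lower (PySem.Str.join ":" [d.getD "url" "", d.getD "username" "", d.getD "password" ""])
  let has_admin := ["admin", "administrator", "root", "superuser", "sysadmin", "webadmin", "dbadmin"].any (fun keyword => PySem.Str.isIn keyword line)
  let has_id_domain := PySem.Str.isIn ".id" line
  if has_admin && has_id_domain then (acc.1 ++ [cred], acc.2.1, acc.2.2.1, acc.2.2.2)
  else if has_admin then (acc.1, acc.2.1 ++ [cred], acc.2.2.1, acc.2.2.2)
  else if has_id_domain then (acc.1, acc.2.1, acc.2.2.1 ++ [cred], acc.2.2.2)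
  else (acc.1, acc.2.1, acc.2.2.1, acc.2.2.2 ++ [cred])

def build_priority_groups_for_file_mode_py (parsed_credentials : List (List (String × String))) : (List (List (String × String))) × (List (List (String × String))) × (List (List (String × String))) × (List (List (String × String))) :=
  parsed_credentials.foldl pvStepA ([], [], [], [])

-- ===== PORT B =====
-- B-side helpers: the factored per-credential tests of Source B
def pvLineB (cred : List (String × String)) : String :=
  let d := PySem.Dict.mk cred
  PySem.Str.lower (PySem.Str.join ":" [d.getD "url" "", d.getD "username" "", d.getD "password" ""])

def pvHasAdmin (cred : List (String × String)) : Bool :=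
  let l := pvLineB cred
  ["admin", "administrator", "root", "superuser", "sysadmin", "webadmin", "dbadmin"].any
    (fun k => PySem.Str.isIn k l)

def pvHasIdd (cred : List (String × String)) : Bool :=
  PySem.Str.isIn ".id" (pvLineB cred)

def build_priority_groups_for_file_mode_py_alt (parsed_credentials : List (List (String × String))) : (List (List (String × String))) × (List (List (String × String))) × (List (List (String × String))) × (List (List (String × String))) :=
  ( parsed_credentials.filter (fun c => pvHasAdmin c && pvHasIdd c),
    parsed_credentials.filter (fun c => pvHasAdmin c && !pvHasIdd c),
    parsed_credentials.filter (fun c => !pvHasAdmin c && pvHasIdd c),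
    parsed_credentials.filter (fun c => !pvHasAdmin c && !pvHasIdd c) )

-- ===== PRECONDITION & SPEC =====
def Spec_build_priority_groups_for_file_mode_py (parsed_credentials : List (List (String × String))) (out : (List (List (String × String))) × (List (List (String × String))) × (List (List (String × String))) × (List (List (String × String)))) : Prop := out = build_priority_groups_for_file_mode_py_alt parsed_credentials
instance (parsed_credentials : List (List (String × String))) (out : (List (List (String × String))) × (List (List (String × String))) × (List (List (String × String))) × (List (List (String × String)))) : Decidable (Spec_build_priority_groups_for_file_mode_py parsed_credentials out) := by unfold Spec_build_priority_groups_for_file_mode_py; infer_instance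

-- ===== CLAIM (what is proved, stated in full; the proofs are below) =====
def Claim_equal_build_priority_groups_for_file_mode_py : Prop := ∀ (parsed_credentials : List (List (String × String))), Dom_build_priority_groups_for_file_mode_py parsed_credentials → Spec_build_priority_groups_for_file_mode_py parsed_credentials (build_priority_groups_for_file_mode_py parsed_credentials)

-- ===== LEMMAS AND PROOFS =====
-- A's step, phrased through B's factored predicates (definitional).
theorem pvStepA_eq (acc : (List (List (String × String))) × (List (List (String × String))) × (List (List (String × String))) × (List (List (String × String)))) (x : List (String × String)) :
    pvStepA acc x =
      if pvHasAdmin x && pvHasIdd x then (acc.1 ++ [x], acc.2.1, acc.2.2.1, acc.2.2.2)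
      else if pvHasAdmin x then (acc.1, acc.2.1 ++ [x], acc.2.2.1, acc.2.2.2)
      else if pvHasIdd x then (acc.1, acc.2.1, acc.2.2.1 ++ [x], acc.2.2.2)
      else (acc.1, acc.2.1, acc.2.2.1, acc.2.2.2 ++ [x]) := rfl

-- The four-accumulator dispatch loop of A appends each bucket's filter to its accumulator.
theorem pvFoldlBuckets (pcs : List (List (String × String)))
    (a b c d : List (List (String × String))) :
    pcs.foldl pvStepA (a, b, c, d)
    = ( a ++ pcs.filter (fun c => pvHasAdmin c && pvHasIdd c),
        b ++ pcs.filter (fun c => pvHasAdmin c && !pvHasIdd c),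
        c ++ pcs.filter (fun c => !pvHasAdmin c && pvHasIdd c),
        d ++ pcs.filter (fun c => !pvHasAdmin c && !pvHasIdd c) ) := by
  induction pcs generalizing a b c d with
  | nil => simp
  | cons x t ih =>
    rw [List.foldl_cons, pvStepA_eq]
    cases ha : pvHasAdmin x <;> cases hi : pvHasIdd x <;> simp [ha, hi, ih]

-- ===== VERDICT (by name: the statement is the Claim_ definition above) =====
theorem build_priority_groups_for_file_mode_py_spec : Claim_equal_build_priority_groups_for_file_mode_py := by
  intro pcs _
  show build_priority_groups_for_file_mode_py pcs = build_priority_groups_for_file_mode_py_alt pcs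
  unfold build_priority_groups_for_file_mode_py build_priority_groups_for_file_mode_py_alt
  simpa using pvFoldlBuckets pcs [] [] [] []
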